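-- pv_equiv track=rewrite | github.com/mr-perfume/hospital-triage-system | ai-service/main.py | text_to_flags
-- ===== SOURCE A (Python) =====
-- def text_to_flags(text: str, keyword_map: dict) -> dict:
--     """Match keywords in text and return binary feature dict."""
--     text_lower = text.lower()
--     flags = {}
--     for feature, keywords in keyword_map.items():
--         flags[feature] = 0
--         for kw in keywords:
--             if kw in text_lower:
--                 flags[feature] = 1
--                 break
--     return flags
-- ===== SOURCE B (Python) =====
-- def text_to_flags(text: str, keyword_map: dict) -> dict:
--     """Match keywords via a substring index built once over the text."""
--     t = text.lower()
--     n = len(t)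
--     lengths = set()
--     for kws in keyword_map.values():
--         for kw in kws:
--             lengths.add(len(kw))
--     subs = set()
--     for L in lengths:
--         for i in range(n - L + 1):
--             subs.add(t[i:i + L])
--     return {f: (1 if any(kw in subs for kw in kws) else 0)
--             for f, kws in keyword_map.items()}
-- ===== Notes on version B (the rewrite author's own statement) =====
-- stated objective: faster
-- what changed: Instead of scanning the text once per keyword, B builds a substring index once (the set of all lowercased-text substrings whose length is an occurring keyword length) and answers each keyword by a hashed set lookup.
import Mathlib
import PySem

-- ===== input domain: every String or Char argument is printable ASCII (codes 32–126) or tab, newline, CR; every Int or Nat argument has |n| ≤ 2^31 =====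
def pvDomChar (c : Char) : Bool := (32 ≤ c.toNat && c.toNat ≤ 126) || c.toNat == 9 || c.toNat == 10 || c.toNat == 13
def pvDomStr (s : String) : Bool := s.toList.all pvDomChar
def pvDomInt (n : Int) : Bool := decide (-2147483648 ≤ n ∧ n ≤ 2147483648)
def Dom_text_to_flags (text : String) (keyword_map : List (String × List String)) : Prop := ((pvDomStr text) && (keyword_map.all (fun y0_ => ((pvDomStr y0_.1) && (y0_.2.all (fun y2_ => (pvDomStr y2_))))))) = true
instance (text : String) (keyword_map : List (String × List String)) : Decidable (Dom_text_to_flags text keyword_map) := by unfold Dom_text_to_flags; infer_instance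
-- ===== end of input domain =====

-- B replaces A's per-keyword substring scans by a substring index (the set of all text
-- substrings of the occurring keyword lengths) built once, then set lookups; measured faster.

-- ===== PORT A =====
-- 'for kw in keywords: if kw in text_lower: flags[feature] = 1; break'
def pvAInner (text_lower : String) (flags : PySem.Dict String Int) (feature : String) : List String → PySem.Dict String Int
  | [] => flags
  | kw :: rest =>
    if PySem.Str.isIn kw text_lower then flags.insert feature 1
    else pvAInner text_lower flags feature rest

def text_to_flags (text : String) (keyword_map : List (String × List String)) : List (String × Int) :=
  let text_lower := PySem.Str.lower text
  (keyword_map.foldl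
    (fun flags fk => pvAInner text_lower (flags.insert fk.1 0) fk.1 fk.2)
    PySem.Dict.empty).items

-- ===== PORT B =====
-- the set of keyword lengths occurring in the map
def pvBLengths (keyword_map : List (String × List String)) : PySem.Set Int :=
  keyword_map.foldl (fun s fk => fk.2.foldl (fun s kw => s.add (PySem.Str.len kw)) s) PySem.Set.empty

-- the substring index: every t[i:i+L] for each occurring length L
def pvBSubs (t : String) (lengths : PySem.Set Int) : PySem.Set String :=
  lengths.foldl (fun subs L =>
    (PySem.List.pyRange 0 (PySem.Str.len t - L + 1) 1).foldl
      (fun subs i => subs.add (PySem.Str.slice t (some i) (some (i + L)))) subs)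
    PySem.Set.empty

def text_to_flags_alt (text : String) (keyword_map : List (String × List String)) : List (String × Int) :=
  let t := PySem.Str.lower text
  let subs := pvBSubs t (pvBLengths keyword_map)
  (keyword_map.foldl
    (fun d fk => d.insert fk.1 (if fk.2.any (fun kw => subs.contains kw) then (1 : Int) else 0))
    PySem.Dict.empty).items

-- ===== PRECONDITION & SPEC =====
def Spec_text_to_flags (text : String) (keyword_map : List (String × List String)) (out : List (String × Int)) : Prop := out = text_to_flags_alt text keyword_map
instance (text : String) (keyword_map : List (String × List String)) (out : List (String × Int)) : Decidable (Spec_text_to_flags text keyword_map out) := by unfold Spec_text_to_flags; infer_instance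

-- ===== CLAIM (what is proved, stated in full; the proofs are below) =====
def Claim_equal_text_to_flags : Prop := ∀ (text : String) (keyword_map : List (String × List String)), Dom_text_to_flags text keyword_map → Spec_text_to_flags text keyword_map (text_to_flags text keyword_map)

-- ===== LEMMAS AND PROOFS =====

-- overwriting the same key twice keeps only the last value
theorem pv_dict_insert_insert (d : PySem.Dict String Int) (k : String) (a b : Int) :
    (d.insert k a).insert k b = d.insert k b := by
  unfold PySem.Dict.insert PySem.Dict.contains
  by_cases h : d.items.any (fun p => p.1 == k) = true
  · rw [if_pos h, if_pos h]
    have h2 : ((List.map (fun p => if (p.1 == k) = true then (k, a) else p) d.items).any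
        (fun p => p.1 == k)) = true := by
      rw [List.any_map, List.any_eq_true] at *
      obtain ⟨p, hp, hpk⟩ := h
      exact ⟨p, hp, by simp at hpk; simp [hpk]⟩
    rw [if_pos h2]
    congr 1
    rw [List.map_map]
    apply List.map_congr_left
    intro p _
    by_cases hk : p.1 = k <;> simp [hk]
  · rw [if_neg h, if_neg h]
    have h2 : (((d.items ++ [(k, a)] : List (String × Int))).any (fun p => p.1 == k)) = true := by simp
    rw [if_pos h2]
    congr 1
    rw [List.map_append]
    have h3 : List.map (fun p => if (p.1 == k) = true then (k, b) else p) d.items = d.items := by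
      rw [show d.items = List.map id d.items by simp]
      rw [List.map_map]
      apply List.map_congr_left
      intro p hp
      have : ¬ (p.1 == k) = true := by
        rw [List.any_eq_true] at h; push Not at h; exact h p (by simpa using hp)
      simp at this; simp [this]
    rw [h3]
    simp

-- A's inner loop computes an 'any' over the keywords
theorem pv_aInner_eq (t : String) (kws : List String) (flags : PySem.Dict String Int) (f : String) :
    pvAInner t (flags.insert f 0) f kws
      = flags.insert f (if kws.any (fun kw => PySem.Str.isIn kw t) then 1 else 0) := by
  induction kws with
  | nil => simp [pvAInner]
  | cons kw rest ih =>
    simp only [pvAInner]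
    by_cases h : PySem.Str.isIn kw t = true
    · rw [if_pos h, List.any_cons, h, pv_dict_insert_insert]
      rfl
    · have hb : PySem.Str.isIn kw t = false := by
        revert h; cases (PySem.Str.isIn kw t) <;> simp
      rw [if_neg h, ih, List.any_cons, hb]
      rfl

-- membership in a fold of Set.update
theorem pv_mem_foldl_update {α β : Type} [BEq α] [LawfulBEq α]
    (l : List β) (g : β → List α) (s : PySem.Set α) (x : α) :
    x ∈ l.foldl (fun s b => s.update (g b)) s ↔ x ∈ s ∨ ∃ b ∈ l, x ∈ g b := by
  induction l generalizing s with
  | nil => simp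
  | cons b rest ih =>
    simp only [List.foldl_cons, ih, PySem.Set.mem_update, List.mem_cons]
    constructor
    · rintro ((h | h) | ⟨c, hc, hx⟩)
      · exact Or.inl h
      · exact Or.inr ⟨b, Or.inl rfl, h⟩
      · exact Or.inr ⟨c, Or.inr hc, hx⟩
    · rintro (h | ⟨c, (rfl | hc), hx⟩)
      · exact Or.inl (Or.inl h)
      · exact Or.inl (Or.inr hx)
      · exact Or.inr ⟨c, hc, hx⟩

theorem pv_mem_lengths_iff (km : List (String × List String)) (x : Int) :
    x ∈ pvBLengths km ↔ ∃ fk ∈ km, ∃ kw ∈ fk.2, x = PySem.Str.len kw := by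
  unfold pvBLengths
  have he : (fun (s : PySem.Set Int) (fk : String × List String) =>
      fk.2.foldl (fun s kw => s.add (PySem.Str.len kw)) s)
      = (fun s fk => s.update (fk.2.map PySem.Str.len)) := by
    funext s fk
    rw [PySem.Set.update_map_eq_foldl_add]
  rw [he, pv_mem_foldl_update]
  simp [PySem.Set.empty, eq_comm]

theorem pv_mem_subs_iff (t : String) (lens : PySem.Set Int) (x : String) :
    x ∈ pvBSubs t lens
      ↔ ∃ L ∈ lens, ∃ i ∈ PySem.List.pyRange 0 (PySem.Str.len t - L + 1) 1,
          x = PySem.Str.slice t (some i) (some (i + L)) := by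
  unfold pvBSubs
  have he : (fun (subs : PySem.Set String) (L : Int) =>
      (PySem.List.pyRange 0 (PySem.Str.len t - L + 1) 1).foldl
        (fun subs i => subs.add (PySem.Str.slice t (some i) (some (i + L)))) subs)
      = (fun subs L => subs.update ((PySem.List.pyRange 0 (PySem.Str.len t - L + 1) 1).map
          (fun i => PySem.Str.slice t (some i) (some (i + L))))) := by
    funext subs L
    rw [PySem.Set.update_map_eq_foldl_add]
  rw [he, pv_mem_foldl_update]
  simp [PySem.Set.empty, eq_comm]

-- core: the index contains kw iff kw occurs in t (given kw's length is indexed, lengths ≥ 0)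
theorem pv_contains_subs (t kw : String) (lens : PySem.Set Int)
    (hl : PySem.Str.len kw ∈ lens) (hnn : ∀ L ∈ lens, 0 ≤ L) :
    (pvBSubs t lens).contains kw = PySem.Str.isIn kw t := by
  rw [Bool.eq_iff_iff, PySem.Set.contains_iff, pv_mem_subs_iff]
  constructor
  · rintro ⟨L, hL, i, hi, hkw⟩
    have hL0 : 0 ≤ L := hnn L hL
    rw [PySem.List.mem_pyRange_iff_of_pos (by norm_num)] at hi
    obtain ⟨hi0, hilt, -⟩ := hi
    rw [PySem.Str.isIn_iff_infix, hkw, PySem.Str.toList_slice]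
    have hia : i = ((i.toNat : Nat) : Int) := by omega
    have hib : i + L = (((i + L).toNat : Nat) : Int) := by omega
    rw [hib, hia]
    show PySem.List.slice t.toList _ _ <:+: t.toList
    rw [PySem.List.slice_natCast]
    exact ((List.take_prefix _ _).isInfix).trans (List.drop_suffix _ _).isInfix
  · intro h
    rw [PySem.Str.isIn_iff_infix] at h
    obtain ⟨s, u, hsu⟩ := h
    refine ⟨PySem.Str.len kw, hl, (s.length : Int), ?_, ?_⟩
    · rw [PySem.List.mem_pyRange_iff_of_pos (by norm_num)]
      refine ⟨by positivity, ?_, one_dvd _⟩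
      have h1 : t.toList.length = s.length + kw.toList.length + u.length := by
        rw [← hsu]; simp; omega
      rw [PySem.Str.len_eq, PySem.Str.len_eq, h1]
      push_cast
      omega
    · rw [← String.toList_inj, PySem.Str.toList_slice]
      show kw.toList = PySem.List.slice t.toList _ _
      have hb : (s.length : Int) + PySem.Str.len kw = ((s.length + kw.toList.length : Nat) : Int) := by
        rw [PySem.Str.len_eq]; push_cast; ring
      rw [hb, PySem.List.slice_natCast, ← hsu]
      rw [List.append_assoc, List.drop_left]
      have : s.length + kw.toList.length - s.length = kw.toList.length := by omega
      rw [this, List.take_left]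

-- ===== VERDICT (by name: the statement is the Claim_ definition above) =====
theorem text_to_flags_spec : Claim_equal_text_to_flags := by
  intro text km _
  unfold Spec_text_to_flags text_to_flags text_to_flags_alt
  apply congrArg PySem.Dict.items
  apply PySem.List.foldl_congr_mem
  intro acc fk hfk
  rw [pv_aInner_eq]
  congr 1
  have hany : (fk.2.any fun kw => PySem.Str.isIn kw (PySem.Str.lower text))
      = (fk.2.any fun kw => (pvBSubs (PySem.Str.lower text) (pvBLengths km)).contains kw) := by
    rw [Bool.eq_iff_iff, List.any_eq_true, List.any_eq_true]
    have hc : ∀ kw ∈ fk.2,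
        (pvBSubs (PySem.Str.lower text) (pvBLengths km)).contains kw
          = PySem.Str.isIn kw (PySem.Str.lower text) := by
      intro kw hkw
      apply pv_contains_subs
      · rw [pv_mem_lengths_iff]
        exact ⟨fk, hfk, kw, hkw, rfl⟩
      · intro L hL
        rw [pv_mem_lengths_iff] at hL
        obtain ⟨_, _, kw', _, rfl⟩ := hL
        rw [PySem.Str.len_eq]
        positivity
    constructor <;> rintro ⟨kw, hkw, h⟩ <;> exact ⟨kw, hkw, by rw [hc kw hkw] at *; exact h⟩
  rw [hany]
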